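-- pv_equiv track=rewrite | github.com/mathewjkavalam/mjkhacks | longest_threshold_sequence.py | permu
-- ===== SOURCE A (Python) =====
-- def permu(hours,x,count):
--     if type(hours) == type([]) and len(hours) >  0:
--         if hours[0] >= x:
--             return max( permu(hours[1:],x,count+1), count)
--     if( len(hours) > 0):
--         return max( permu(hours[1:],x,0), count)
--     else:
--         return count
-- ===== SOURCE B (Python) =====
-- def permu(hours, x, count):
--     best = count
--     cur = count
--     for h in hours:
--         cur = cur + 1 if h >= x else 0
--         if cur > best:
--             best = cur
--     return best
-- ===== Notes on version B (the rewrite author's own statement) =====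
-- stated objective: faster
-- what changed: Replaced the O(n^2) recursion (each step slicing hours[1:]) by a single linear pass keeping the current and best streak, seeded with count.
import Mathlib
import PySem

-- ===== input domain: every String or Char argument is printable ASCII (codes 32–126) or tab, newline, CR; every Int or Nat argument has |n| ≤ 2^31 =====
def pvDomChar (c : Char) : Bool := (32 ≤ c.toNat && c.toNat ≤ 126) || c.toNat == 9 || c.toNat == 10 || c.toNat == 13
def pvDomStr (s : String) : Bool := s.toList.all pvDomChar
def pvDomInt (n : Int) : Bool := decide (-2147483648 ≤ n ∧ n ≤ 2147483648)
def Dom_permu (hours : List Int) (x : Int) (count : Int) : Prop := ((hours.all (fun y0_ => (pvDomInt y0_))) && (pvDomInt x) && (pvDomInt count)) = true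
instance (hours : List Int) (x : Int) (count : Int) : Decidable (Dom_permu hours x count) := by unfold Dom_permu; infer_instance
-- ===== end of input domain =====

-- B replaces A's O(n^2) slicing recursion with one linear pass tracking current/best streak (faster).


-- ===== PORT A =====
def permu (hours : List Int) (x : Int) (count : Int) : Int :=
  match hours with
  | [] => count
  | h :: t =>
    if h ≥ x then max (permu t x (count + 1)) count
    else max (permu t x 0) count

-- ===== PORT B =====
-- fold state: (best, cur)
def permu_alt (hours : List Int) (x : Int) (count : Int) : Int :=
  (hours.foldl (fun (s : Int × Int) h =>
      let cur := if h ≥ x then s.2 + 1 else 0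
      (if cur > s.1 then cur else s.1, cur)) (count, count)).1

-- ===== PRECONDITION & SPEC =====
def Spec_permu (hours : List Int) (x : Int) (count : Int) (out : Int) : Prop := out = permu_alt hours x count
instance (hours : List Int) (x : Int) (count : Int) (out : Int) : Decidable (Spec_permu hours x count out) := by unfold Spec_permu; infer_instance

-- ===== CLAIM (what is proved, stated in full; the proofs are below) =====
def Claim_equal_permu : Prop := ∀ (hours : List Int) (x : Int) (count : Int), Dom_permu hours x count → Spec_permu hours x count (permu hours x count)

-- ===== LEMMAS AND PROOFS =====

def pvStep (x : Int) : Int × Int → Int → Int × Int :=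
  fun s h =>
    let cur := if h ≥ x then s.2 + 1 else 0
    (if cur > s.1 then cur else s.1, cur)

theorem permu_alt_eq_fold (hours : List Int) (x count : Int) :
    permu_alt hours x count = (hours.foldl (pvStep x) (count, count)).1 := rfl

-- pulling a max out of the fold's best component
theorem fold_best_max (x : Int) (t : List Int) :
    ∀ (b1 b2 cur : Int),
      (t.foldl (pvStep x) (max b1 b2, cur)).1 = max b1 (t.foldl (pvStep x) (b2, cur)).1 := by
  induction t with
  | nil => intro b1 b2 cur; simp
  | cons h t ih =>
    intro b1 b2 cur
    simp only [List.foldl_cons, pvStep]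
    by_cases hx : h ≥ x <;> simp only [hx, if_pos, ite_false]
    · have : (if cur + 1 > max b1 b2 then cur + 1 else max b1 b2)
          = max b1 (if cur + 1 > b2 then cur + 1 else b2) := by
        split_ifs <;> omega
      rw [this, ih]
    · have : (if (0:Int) > max b1 b2 then (0:Int) else max b1 b2)
          = max b1 (if (0:Int) > b2 then (0:Int) else b2) := by
        split_ifs <;> omega
      rw [this, ih]

theorem permu_eq_fold (hours : List Int) (x : Int) :
    ∀ count : Int, permu hours x count = (hours.foldl (pvStep x) (count, count)).1 := by
  induction hours with
  | nil => intro count; simp [permu]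
  | cons h t ih =>
    intro count
    simp only [List.foldl_cons, pvStep]
    by_cases hx : h ≥ x
    · simp only [permu, hx, if_pos]
      rw [ih (count + 1)]
      have h1 : (if count + 1 > count then count + 1 else count) = count + 1 := by omega
      have h2 : (count + 1 : Int) = max count (count + 1) := by omega
      rw [h1]
      calc max (t.foldl (pvStep x) (count + 1, count + 1)).1 count
          = max count (t.foldl (pvStep x) (count + 1, count + 1)).1 := by omega
        _ = (t.foldl (pvStep x) (max count (count + 1), count + 1)).1 := (fold_best_max x t _ _ _).symm
        _ = (t.foldl (pvStep x) (count + 1, count + 1)).1 := by rw [← h2]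
    · simp only [permu, hx, if_neg, not_false_iff]
      rw [ih 0]
      have h1 : (if (0:Int) > count then (0:Int) else count) = max count 0 := by omega
      rw [h1, fold_best_max x t]
      omega

-- ===== VERDICT (by name: the statement is the Claim_ definition above) =====
theorem permu_spec : Claim_equal_permu := by
  intro hours x count _
  unfold Spec_permu
  rw [permu_alt_eq_fold, permu_eq_fold]
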